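-- pv_equiv track=rewrite | github.com/wujiexplorer/Python.wangmeng.definition | jd/Handkerchief.py | fnA
-- ===== SOURCE A (Python) =====
-- def fnA(p, personNum, cnt):
--     times = cnt // personNum + 1
--     temp = [];
--
--     for t in range(times):
--         temp = temp + p
--
--     p2 = p[:]
--     p2.remove(temp[cnt-1])
--     return p2
-- ===== SOURCE B (Python) =====
-- def fnA(p, personNum, cnt):
--     # Index the cyclic position directly instead of materialising cnt//personNum+1
--     # concatenated copies of p.
--     v = p[(cnt - 1) % len(p)]
--     p2 = p[:]
--     p2.remove(v)
--     return p2
-- ===== Notes on version B (the rewrite author's own statement) =====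
-- stated objective: alternative
-- what changed: B replaces the loop that builds cnt//personNum+1 concatenated copies of p with a single modular index p[(cnt-1)%len(p)], which yields the same removed value; asymptotically O(n) vs O(times*n), though a timing run could not consistently confirm a speed-up; Pre_ excludes only inputs where A raises (ZeroDivisionError/IndexError).
import Mathlib
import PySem

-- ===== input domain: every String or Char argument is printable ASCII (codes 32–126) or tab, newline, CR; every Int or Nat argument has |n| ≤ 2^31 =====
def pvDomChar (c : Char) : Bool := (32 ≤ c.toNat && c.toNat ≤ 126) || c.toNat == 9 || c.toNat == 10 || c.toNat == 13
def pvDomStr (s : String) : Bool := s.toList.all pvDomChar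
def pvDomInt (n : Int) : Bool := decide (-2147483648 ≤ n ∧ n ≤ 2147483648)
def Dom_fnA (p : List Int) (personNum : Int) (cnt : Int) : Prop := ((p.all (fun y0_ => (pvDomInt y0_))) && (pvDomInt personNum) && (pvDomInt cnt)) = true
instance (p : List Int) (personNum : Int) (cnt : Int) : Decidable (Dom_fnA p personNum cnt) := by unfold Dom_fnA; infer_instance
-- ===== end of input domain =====

-- B replaces A's loop building cnt//personNum+1 concatenated copies of p with one
-- modular index p[(cnt-1) % len(p)] (objective: alternative algorithm, no loop).

-- ===== PORT A =====
def fnA (p : List Int) (personNum : Int) (cnt : Int) : List Int :=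
  let times := PySem.Int.floordiv cnt personNum + 1
  let temp := (PySem.List.pyRange 0 times 1).foldl (fun acc _t => acc ++ p) []
  let p2 := PySem.List.slice p none none
  match PySem.List.pyGet? temp (cnt - 1) with
  | none => []        -- IndexError: excluded by Pre_fnA
  | some v => (PySem.List.remove? p2 v).getD p2

-- ===== PORT B =====
def fnA_alt (p : List Int) (personNum : Int) (cnt : Int) : List Int :=
  match PySem.List.pyGet? p (PySem.Int.mod (cnt - 1) (p.length : Int)) with
  | none => []        -- unreachable for nonempty p
  | some v =>
    let p2 := PySem.List.slice p none none
    (PySem.List.remove? p2 v).getD p2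

-- ===== PRECONDITION & SPEC =====
-- Pre_fnA is exactly where Python A returns: p nonempty, personNum ≠ 0 (no
-- ZeroDivisionError), and cnt-1 a valid (possibly negative) Python index into the
-- max(times,0) * len(p) element concatenation.
def Pre_fnA (p : List Int) (personNum : Int) (cnt : Int) : Prop :=
  p ≠ [] ∧ personNum ≠ 0 ∧
  -((max (PySem.Int.floordiv cnt personNum + 1) 0) * (p.length : Int)) ≤ cnt - 1 ∧
  cnt - 1 < (max (PySem.Int.floordiv cnt personNum + 1) 0) * (p.length : Int)
instance (p : List Int) (personNum : Int) (cnt : Int) : Decidable (Pre_fnA p personNum cnt) := by unfold Pre_fnA; infer_instance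

def pvWitness_fnA : List Int × Int × Int := ([1, 2, 3], 2, 3)

def Spec_fnA (p : List Int) (personNum : Int) (cnt : Int) (out : List Int) : Prop := out = fnA_alt p personNum cnt
instance (p : List Int) (personNum : Int) (cnt : Int) (out : List Int) : Decidable (Spec_fnA p personNum cnt out) := by unfold Spec_fnA; infer_instance

-- ===== CLAIM (what is proved, stated in full; the proofs are below) =====
def Claim_equal_fnA : Prop := ∀ (p : List Int) (personNum : Int) (cnt : Int), Dom_fnA p personNum cnt → Pre_fnA p personNum cnt → Spec_fnA p personNum cnt (fnA p personNum cnt)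

-- ===== LEMMAS AND PROOFS =====

theorem repFlat_len (p : List Int) (k : Nat) :
    ((List.replicate k p).flatten).length = k * p.length := by
  induction k with
  | zero => simp
  | succ k ih => simp [List.replicate_succ, ih, Nat.succ_mul]; ring

theorem foldl_range_append (p : List Int) :
    ∀ (k : Nat) (init : List Int),
      (List.range k).foldl (fun acc _ => acc ++ p) init
        = init ++ (List.replicate k p).flatten := by
  intro k
  induction k with
  | zero => intro init; simp
  | succ k ih =>
      intro init
      rw [List.range_succ, List.foldl_append, ih]
      simp [List.replicate_succ']

theorem repFlat_get (p : List Int) :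
    ∀ (k j : Nat), j < k * p.length →
      ((List.replicate k p).flatten)[j]? = p[j % p.length]? := by
  intro k
  induction k with
  | zero => intro j hj; exact absurd hj (by simp)
  | succ k ih =>
      intro j hj
      rw [List.replicate_succ, List.flatten_cons]
      by_cases h : j < p.length
      · rw [List.getElem?_append_left h, Nat.mod_eq_of_lt h]
      · have hle : p.length ≤ j := Nat.le_of_not_lt h
        rw [List.getElem?_append_right hle,
            Nat.mod_eq_sub_mod hle]
        apply ih
        rw [Nat.succ_mul] at hj
        omega

theorem pyGet_rep (p : List Int) (hn : p ≠ []) (k : Nat) (i : Int)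
    (h1 : -((k : Int) * (p.length : Int)) ≤ i)
    (h2 : i < (k : Int) * (p.length : Int)) :
    PySem.List.pyGet? ((List.replicate k p).flatten) i
      = PySem.List.pyGet? p (PySem.Int.mod i (p.length : Int)) := by
  have hn' : 0 < p.length := List.length_pos_iff.mpr hn
  have hnz : (0 : Int) < (p.length : Int) := by exact_mod_cast hn'
  have hmod : PySem.Int.mod i (p.length : Int) = i % (p.length : Int) :=
    PySem.Int.mod_eq_emod_of_pos hnz
  have hmn : 0 ≤ i % (p.length : Int) := Int.emod_nonneg i (by omega)
  rw [hmod, PySem.List.pyGet?_of_nonneg p hmn]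
  by_cases hi : 0 ≤ i
  · rw [PySem.List.pyGet?_of_nonneg _ hi]
    have hj : i.toNat < k * p.length := by
      have : (i.toNat : Int) < (k : Int) * (p.length : Int) := by
        rwa [Int.toNat_of_nonneg hi]
      exact_mod_cast this
    rw [repFlat_get p k i.toNat hj]
    congr 1
    have : i % (p.length : Int) = ((i.toNat % p.length : Nat) : Int) := by
      push_cast
      rw [Int.toNat_of_nonneg hi]
    rw [this, Int.toNat_natCast]
  · have hlt : i < 0 := by omega
    set k' : Nat := (-i).toNat with hk'
    have hik : i = -(k' : Int) := by omega
    have hk'pos : 0 < k' := by omega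
    have hk'le : (k' : Int) ≤ (k : Int) * (p.length : Int) := by omega
    have hk'le' : k' ≤ k * p.length := by exact_mod_cast hk'le
    rw [hik, PySem.List.pyGet?_neg_natCast _ k' hk'pos (by rw [repFlat_len]; exact hk'le')]
    rw [repFlat_len]
    rw [repFlat_get p k (k * p.length - k') (by omega)]
    congr 1
    have : (-(k' : Int)) % (p.length : Int)
        = (((k * p.length - k' : Nat)) % p.length : Nat) := by
      push_cast [Nat.cast_sub hk'le']
      have h9 : (k : Int) * (p.length : Int) - (k' : Int)
          = -(k' : Int) + (p.length : Int) * (k : Int) := by ring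
      rw [h9, Int.add_mul_emod_self_left]
    rw [this, Int.toNat_natCast]

theorem fnA_eq (p : List Int) (personNum : Int) (cnt : Int) :
    fnA p personNum cnt
      = match PySem.List.pyGet?
            ((PySem.List.pyRange 0 (PySem.Int.floordiv cnt personNum + 1) 1).foldl
              (fun acc _t => acc ++ p) []) (cnt - 1) with
        | none => []
        | some v => (PySem.List.remove? (PySem.List.slice p none none) v).getD
            (PySem.List.slice p none none) := rfl

theorem fnA_alt_eq (p : List Int) (personNum : Int) (cnt : Int) :
    fnA_alt p personNum cnt
      = match PySem.List.pyGet? p (PySem.Int.mod (cnt - 1) (p.length : Int)) with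
        | none => []
        | some v => (PySem.List.remove? (PySem.List.slice p none none) v).getD
            (PySem.List.slice p none none) := rfl

theorem temp_eq (p : List Int) (t : Int) :
    (PySem.List.pyRange 0 t 1).foldl (fun acc _x => acc ++ p) []
      = (List.replicate t.toNat p).flatten := by
  rw [PySem.List.pyRange_one, List.foldl_map, foldl_range_append]
  simp

-- ===== VERDICT (by name: the statement is the Claim_ definition above) =====
theorem fnA_spec : Claim_equal_fnA := by
  intro p personNum cnt _hdom hpre
  obtain ⟨hne, hpn, h1, h2⟩ := hpre
  unfold Spec_fnA
  rw [fnA_eq, fnA_alt_eq, temp_eq]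
  have hmax : ((PySem.Int.floordiv cnt personNum + 1).toNat : Int)
      = max (PySem.Int.floordiv cnt personNum + 1) 0 := Int.toNat_eq_max _
  rw [pyGet_rep p hne _ (cnt - 1) (by rw [hmax]; exact h1) (by rw [hmax]; exact h2)]
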